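-- pv_equiv track=rewrite | github.com/realhardik18/MenuChef | helpers.py | recommend_food_type
-- ===== SOURCE A (Python) =====
-- def recommend_food_type(temperature):
--     score_HTF=0
--     score_CTF=0
--     score_RTF=0
--     #0 for cold food
--     #1 for hot-food
--     #2 for room-food
--     if temperature <= 20:
--         score_HTF+=1
--         score_CTF-=1
--     elif 20 < temperature <= 35:
--         score_RTF+=1
--         score_CTF-=1
--     else:
--         score_CTF+=1
--         score_HTF-=1
--     hierarchy={
--         "0":score_CTF,
--         "1":score_HTF,
--         "2":score_RTF
--     }
--     final=sorted(hierarchy.items(), key=lambda x: x[1], reverse=True)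
--     return [x[0] for x in final]
-- ===== SOURCE B (Python) =====
-- def recommend_food_type(temperature):
--     # simpler: return the precomputed ranking directly per temperature band
--     if temperature <= 20:
--         return ['1', '2', '0']
--     elif temperature <= 35:
--         return ['2', '1', '0']
--     else:
--         return ['0', '2', '1']
-- ===== Notes on version B (the rewrite author's own statement) =====
-- stated objective: simpler
-- what changed: Replaces the score accumulation, dict build and stable sorted() call with direct constant ranking lists returned per temperature branch.
import Mathlib
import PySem

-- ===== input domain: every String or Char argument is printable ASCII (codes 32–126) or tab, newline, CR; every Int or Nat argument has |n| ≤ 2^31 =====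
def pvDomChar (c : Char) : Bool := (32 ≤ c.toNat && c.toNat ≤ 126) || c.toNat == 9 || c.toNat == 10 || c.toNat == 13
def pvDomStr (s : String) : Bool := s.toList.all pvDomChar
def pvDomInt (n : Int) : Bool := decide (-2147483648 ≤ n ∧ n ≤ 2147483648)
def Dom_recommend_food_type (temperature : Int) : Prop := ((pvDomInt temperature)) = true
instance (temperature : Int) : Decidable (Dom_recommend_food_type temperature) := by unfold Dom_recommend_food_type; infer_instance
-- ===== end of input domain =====

-- ===== PORT A =====
-- Literal port of A: accumulate scores, build the dict's items, stable-sort by value descending, project keys.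
def recommend_food_type (temperature : Int) : List String :=
  let score_HTF : Int := 0
  let score_CTF : Int := 0
  let score_RTF : Int := 0
  let (score_HTF, score_CTF, score_RTF) :=
    if temperature ≤ 20 then (score_HTF + 1, score_CTF - 1, score_RTF)
    else if 20 < temperature ∧ temperature ≤ 35 then (score_HTF, score_CTF - 1, score_RTF + 1)
    else (score_HTF - 1, score_CTF + 1, score_RTF)
  let hierarchy : List (String × Int) := [("0", score_CTF), ("1", score_HTF), ("2", score_RTF)]
  let final := PySem.List.sorted hierarchy (fun x => x.2) true
  final.map (fun x => x.1)

-- ===== PORT B =====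
-- B returns the precomputed ranking list for each temperature band directly.
def recommend_food_type_alt (temperature : Int) : List String :=
  if temperature ≤ 20 then ["1", "2", "0"]
  else if temperature ≤ 35 then ["2", "1", "0"]
  else ["0", "2", "1"]

-- ===== PRECONDITION & SPEC =====
def Spec_recommend_food_type (temperature : Int) (out : List String) : Prop := out = recommend_food_type_alt temperature
instance (temperature : Int) (out : List String) : Decidable (Spec_recommend_food_type temperature out) := by unfold Spec_recommend_food_type; infer_instance

-- ===== CLAIM (what is proved, stated in full; the proofs are below) =====
def Claim_equal_recommend_food_type : Prop := ∀ (temperature : Int), Dom_recommend_food_type temperature → Spec_recommend_food_type temperature (recommend_food_type temperature)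

-- ===== LEMMAS AND PROOFS =====

-- ===== VERDICT (by name: the statement is the Claim_ definition above) =====
theorem recommend_food_type_spec : Claim_equal_recommend_food_type := by
  intro t _
  unfold Spec_recommend_food_type recommend_food_type recommend_food_type_alt
  by_cases h1 : t ≤ 20
  · simp [h1]; decide
  · have h1' : 20 < t := by omega
    by_cases h2 : t ≤ 35
    · simp [h1, h2, h1']; decide
    · simp [h1, h2]; decide
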